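-- pv_equiv track=rewrite | github.com/Alyndiar/BeamNG-Manager | ui/main_window.py | _effective_profile_states_and_conflicts
-- ===== SOURCE A (Python) =====
-- def _effective_profile_states_and_conflicts(
--
--     available_mod_paths: set[str],
--     profile_mod_states: dict[str, bool],
--     db_active_map: dict[str, bool],
-- ) -> tuple[dict[str, bool], list[tuple[str, bool, bool]]]:
--     profile_effective: dict[str, bool] = {}
--
--     # Explicit profile entries always apply for scanned mods.
--     for fp, profile_state in profile_mod_states.items():
--         if fp in available_mod_paths:
--             profile_effective[fp] = bool(profile_state)
--
--     # If a scanned mod is missing from profile, assume profile wants it inactive.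
--     for fp in available_mod_paths:
--         if fp in profile_effective:
--             continue
--         profile_effective[fp] = False
--
--     conflicts: list[tuple[str, bool, bool]] = []
--     for fp, profile_state in profile_effective.items():
--         if fp not in db_active_map:
--             continue
--         db_state = bool(db_active_map[fp])
--         if bool(profile_state) != db_state:
--             conflicts.append((fp, bool(profile_state), db_state))
--     conflicts.sort(key=lambda item: item[0].lower())
--     return profile_effective, conflicts
-- ===== SOURCE B (Python) =====
-- def _effective_profile_states_and_conflicts(
--     available_mod_paths,
--     profile_mod_states,
--     db_active_map,
-- ):
--     # Key-universe construction: build the ordered effective key list first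
--     # (explicit profile entries, then the remaining scanned mods) and give every
--     # key its state by ONE defaulted profile lookup; conflicts are derived from
--     # the DB side, never from the finished effective mapping.
--     explicit = [fp for fp in profile_mod_states if fp in available_mod_paths]
--     implicit = [fp for fp in available_mod_paths if fp not in profile_mod_states]
--     profile_effective = {
--         fp: bool(profile_mod_states.get(fp, False)) for fp in explicit + implicit
--     }
--     conflicts = sorted(
--         (
--             (fp, bool(profile_mod_states.get(fp, False)), bool(db_state))
--             for fp, db_state in db_active_map.items()
--             if fp in available_mod_paths
--             and bool(profile_mod_states.get(fp, False)) != bool(db_state)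
--         ),
--         key=lambda item: item[0].lower(),
--     )
--     return profile_effective, conflicts
-- ===== Notes on version B (the rewrite author's own statement) =====
-- stated objective: alternative
-- what changed: B inverts both constructions: instead of A's insert-or-backfill dict building and a scan over the finished effective mapping filtered by db membership, B first computes the ordered key universe (explicit profile keys, then the remaining scanned mods), assigns every key by one defaulted profile lookup, and derives conflicts by iterating db_active_map itself, testing availability and the defaulted profile state, so the effective mapping is never consulted for conflicts.
import Mathlib
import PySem

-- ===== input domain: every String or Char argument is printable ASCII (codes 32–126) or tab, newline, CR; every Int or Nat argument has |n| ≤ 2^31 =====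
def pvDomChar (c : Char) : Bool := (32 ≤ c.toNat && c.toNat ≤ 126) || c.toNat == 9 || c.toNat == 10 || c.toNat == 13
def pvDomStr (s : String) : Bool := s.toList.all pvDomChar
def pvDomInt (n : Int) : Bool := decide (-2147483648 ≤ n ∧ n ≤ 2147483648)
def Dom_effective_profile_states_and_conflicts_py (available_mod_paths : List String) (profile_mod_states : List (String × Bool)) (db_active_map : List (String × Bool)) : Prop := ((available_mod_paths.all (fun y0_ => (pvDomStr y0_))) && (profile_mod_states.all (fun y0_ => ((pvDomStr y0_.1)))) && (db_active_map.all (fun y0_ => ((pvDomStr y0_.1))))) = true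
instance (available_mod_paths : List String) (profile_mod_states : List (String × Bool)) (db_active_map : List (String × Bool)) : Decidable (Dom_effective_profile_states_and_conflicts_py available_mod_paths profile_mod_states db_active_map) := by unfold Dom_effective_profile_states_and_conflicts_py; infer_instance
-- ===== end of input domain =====

-- B builds the effective map from its ordered key universe with one defaulted profile
-- lookup per key and derives conflicts by iterating db_active_map instead of the finished
-- effective mapping (objective: alternative decomposition, same cost). RETURN VALUE only.

-- ===== PORT A =====
-- the body of A's third loop: skip if fp not in db_active_map, else compare and append
def pvConflictStepA (dbd : PySem.Dict String Bool) (acc : List (String × Bool × Bool)) (p : String × Bool) : List (String × Bool × Bool) :=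
  match dbd.get? p.1 with
  | none => acc
  | some db_state => if p.2 ≠ db_state then acc ++ [(p.1, p.2, db_state)] else acc

def effective_profile_states_and_conflicts_py (available_mod_paths : List String) (profile_mod_states : List (String × Bool)) (db_active_map : List (String × Bool)) : (List (String × Bool)) × (List (String × Bool × Bool)) :=
  let dbd : PySem.Dict String Bool := PySem.Dict.ofList db_active_map
  -- explicit profile entries always apply for scanned mods
  let eff1 : PySem.Dict String Bool :=
    profile_mod_states.foldl
      (fun d p => if PySem.Set.contains available_mod_paths p.1 then d.insert p.1 p.2 else d)
      PySem.Dict.empty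
  -- scanned mods missing from the profile are assumed inactive
  let eff2 : PySem.Dict String Bool :=
    available_mod_paths.foldl
      (fun d fp => if d.contains fp then d else d.insert fp false) eff1
  let conflicts := eff2.items.foldl (pvConflictStepA dbd) []
  (eff2.items, PySem.List.sorted conflicts (fun item => PySem.Str.lower item.1) false)

-- ===== PORT B =====
def effective_profile_states_and_conflicts_py_alt (available_mod_paths : List String) (profile_mod_states : List (String × Bool)) (db_active_map : List (String × Bool)) : (List (String × Bool)) × (List (String × Bool × Bool)) :=
  let pmd : PySem.Dict String Bool := PySem.Dict.ofList profile_mod_states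
  let dbd : PySem.Dict String Bool := PySem.Dict.ofList db_active_map
  -- ordered key universe: explicit profile keys first, then the remaining scanned mods
  let explicit := pmd.keys.filter (fun fp => PySem.Set.contains available_mod_paths fp)
  let implicit := available_mod_paths.filter (fun fp => !(pmd.contains fp))
  -- one defaulted profile lookup per key (dict comprehension)
  let profile_effective : PySem.Dict String Bool :=
    PySem.Dict.ofList ((explicit ++ implicit).map (fun fp => (fp, pmd.getD fp false)))
  -- conflicts are derived from the DB side
  let conflicts := dbd.items.foldl
    (fun acc p =>
      if PySem.Set.contains available_mod_paths p.1 && (pmd.getD p.1 false != p.2) then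
        acc ++ [(p.1, pmd.getD p.1 false, p.2)]
      else acc) []
  (profile_effective.items, PySem.List.sorted conflicts (fun item => PySem.Str.lower item.1) false)

-- ===== PRECONDITION & SPEC =====
-- The list arguments stand for a Python set and two dicts, so their keys are distinct
-- (lists with duplicate keys represent no Python input). Additionally Pre_ excludes
-- db_active_map having two distinct keys that coincide case-insensitively: there A still
-- returns, but the stable sort's tie order between such conflict entries follows the
-- traversal order of the source each implementation iterates, an accident neither specifies.
def Pre_effective_profile_states_and_conflicts_py (available_mod_paths : List String) (profile_mod_states : List (String × Bool)) (db_active_map : List (String × Bool)) : Prop :=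
  available_mod_paths.Nodup ∧ (profile_mod_states.map Prod.fst).Nodup ∧
  (db_active_map.map (fun p => PySem.Str.lower p.1)).Nodup
instance (available_mod_paths : List String) (profile_mod_states : List (String × Bool)) (db_active_map : List (String × Bool)) : Decidable (Pre_effective_profile_states_and_conflicts_py available_mod_paths profile_mod_states db_active_map) := by unfold Pre_effective_profile_states_and_conflicts_py; infer_instance

def pvWitness_effective_profile_states_and_conflicts_py : List String × (List (String × Bool)) × (List (String × Bool)) :=
  (["a.zip", "b.zip"], [("a.zip", true)], [("a.zip", false), ("c.zip", true)])

def Spec_effective_profile_states_and_conflicts_py (available_mod_paths : List String) (profile_mod_states : List (String × Bool)) (db_active_map : List (String × Bool)) (out : (List (String × Bool)) × (List (String × Bool × Bool))) : Prop := out = effective_profile_states_and_conflicts_py_alt available_mod_paths profile_mod_states db_active_map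
instance (available_mod_paths : List String) (profile_mod_states : List (String × Bool)) (db_active_map : List (String × Bool)) (out : (List (String × Bool)) × (List (String × Bool × Bool))) : Decidable (Spec_effective_profile_states_and_conflicts_py available_mod_paths profile_mod_states db_active_map out) := by unfold Spec_effective_profile_states_and_conflicts_py; infer_instance

-- ===== CLAIM (what is proved, stated in full; the proofs are below) =====
def Claim_equal_effective_profile_states_and_conflicts_py : Prop := ∀ (available_mod_paths : List String) (profile_mod_states : List (String × Bool)) (db_active_map : List (String × Bool)), Dom_effective_profile_states_and_conflicts_py available_mod_paths profile_mod_states db_active_map → Pre_effective_profile_states_and_conflicts_py available_mod_paths profile_mod_states db_active_map → Spec_effective_profile_states_and_conflicts_py available_mod_paths profile_mod_states db_active_map (effective_profile_states_and_conflicts_py available_mod_paths profile_mod_states db_active_map)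

-- ===== LEMMAS AND PROOFS =====

-- membership form of Dict.contains, at the items level
lemma pv_contains_iff (d : PySem.Dict String Bool) (k : String) :
    d.contains k = true ↔ k ∈ d.items.map Prod.fst := by
  rw [PySem.Dict.contains_iff_mem_keys]; simp only [PySem.Dict.keys]

-- PySem.Set.contains is list membership
lemma pv_set_contains (l : List String) (x : String) :
    PySem.Set.contains l x = true ↔ x ∈ l := by
  simp [PySem.Set.contains]

-- a conditional insert-fold over pairwise-fresh keys just appends the kept pairs
lemma pv_foldl_insert_items (c : String × Bool → Bool) :
    ∀ (l : List (String × Bool)) (d : PySem.Dict String Bool),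
    (l.map Prod.fst).Nodup → (∀ p ∈ l, d.contains p.1 = false) →
    (l.foldl (fun d p => if c p then d.insert p.1 p.2 else d) d).items
      = d.items ++ l.filter c := by
  intro l
  induction l with
  | nil => simp
  | cons p rest ih =>
    intro d hnd hfresh
    simp only [List.map_cons, List.nodup_cons] at hnd
    by_cases hc : c p
    · have hf : d.contains p.1 = false := hfresh p (by simp)
      have hfresh' : ∀ q ∈ rest, (d.insert p.1 p.2).contains q.1 = false := by
        intro q hq
        rw [PySem.Dict.contains_insert]
        have hne : q.1 ≠ p.1 := fun h => hnd.1 (h ▸ List.mem_map_of_mem hq)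
        simp [hne, hfresh q (List.mem_cons_of_mem _ hq)]
      simp only [List.foldl_cons, hc, List.filter_cons_of_pos hc, reduceIte]
      rw [ih _ hnd.2 hfresh', PySem.Dict.items_insert_of_not_contains d p.2 hf]
      simp
    · simp only [List.foldl_cons, if_neg hc, List.filter_cons_of_neg (by simpa using hc)]
      exact ih _ hnd.2 (fun q hq => hfresh q (List.mem_cons_of_mem _ hq))

-- A's back-fill loop: appends (fp, false) for exactly the scanned mods absent so far
lemma pv_backfillA_items :
    ∀ (av : List String) (d : PySem.Dict String Bool), av.Nodup →
    (av.foldl (fun d fp => if d.contains fp then d else d.insert fp false) d).items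
      = d.items ++ (av.filter (fun fp => !(d.contains fp))).map (fun fp => (fp, false)) := by
  intro av
  induction av with
  | nil => simp
  | cons fp rest ih =>
    intro d hnd
    rw [List.nodup_cons] at hnd
    by_cases hc : d.contains fp
    · simp only [List.foldl_cons, List.filter_cons, hc, reduceIte, Bool.not_true]
      simpa using ih d hnd.2
    · have hc' : d.contains fp = false := by simpa using hc
      simp only [List.foldl_cons, List.filter_cons, hc', reduceIte, Bool.false_eq_true,
        Bool.not_false]
      rw [ih _ hnd.2]
      rw [PySem.Dict.items_insert_of_not_contains d false hc']
      have hcong : rest.filter (fun x => !(d.insert fp false).contains x)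
          = rest.filter (fun x => !d.contains x) := by
        apply List.filter_congr
        intro x hx
        rw [PySem.Dict.contains_insert]
        have hne : x ≠ fp := fun h => hnd.1 (h ▸ hx)
        simp [hne]
      rw [hcong]; simp

-- Dict.update (hence Dict.ofList) with pairwise-fresh keys appends its argument
lemma pv_update_items :
    ∀ (l : List (String × Bool)) (d : PySem.Dict String Bool),
    (l.map Prod.fst).Nodup → (∀ p ∈ l, d.contains p.1 = false) →
    (d.update l).items = d.items ++ l := by
  intro l
  induction l with
  | nil => intro d _ _; simp [PySem.Dict.update]
  | cons p rest ih =>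
    intro d hnd hfresh
    simp only [List.map_cons, List.nodup_cons] at hnd
    have hf : d.contains p.1 = false := hfresh p (by simp)
    have hfresh' : ∀ q ∈ rest, (d.insert p.1 p.2).contains q.1 = false := by
      intro q hq
      rw [PySem.Dict.contains_insert]
      have hne : q.1 ≠ p.1 := fun h => hnd.1 (h ▸ List.mem_map_of_mem hq)
      simp [hne, hfresh q (List.mem_cons_of_mem _ hq)]
    show ((d.insert p.1 p.2).update rest).items = d.items ++ p :: rest
    rw [ih _ hnd.2 hfresh', PySem.Dict.items_insert_of_not_contains d p.2 hf]
    simp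

lemma pv_ofList_items (l : List (String × Bool)) (hnd : (l.map Prod.fst).Nodup) :
    (PySem.Dict.ofList l).items = l := by
  show ((PySem.Dict.empty : PySem.Dict String Bool).update l).items = l
  rw [pv_update_items l PySem.Dict.empty hnd (fun p _ => rfl)]
  rfl

-- A's conflict fold, as filter-then-map
lemma pv_foldA (dbd : PySem.Dict String Bool) :
    ∀ (l : List (String × Bool)) (acc : List (String × Bool × Bool)),
    l.foldl (pvConflictStepA dbd) acc
      = acc ++ (l.filter (fun p => (dbd.get? p.1).any (fun s => p.2 != s))).map
          (fun p => (p.1, p.2, dbd.getD p.1 false)) := by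
  intro l
  induction l with
  | nil => simp
  | cons p rest ih =>
    intro acc
    have hstep : pvConflictStepA dbd acc p
        = if (dbd.get? p.1).any (fun s => p.2 != s) then
            acc ++ [(p.1, p.2, dbd.getD p.1 false)] else acc := by
      unfold pvConflictStepA
      cases hg : dbd.get? p.1 with
      | none => simp [Option.any]
      | some s =>
        have : dbd.getD p.1 false = s := by
          rw [PySem.Dict.getD_eq_get?_getD, hg]; rfl
        by_cases h : p.2 ≠ s <;> simp [Option.any, h, this]
    rw [List.foldl_cons, hstep, ih]
    by_cases hc : (dbd.get? p.1).any (fun s => p.2 != s) = true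
    · simp [hc]
    · simp [hc]

-- ===== VERDICT proof =====
theorem effective_profile_states_and_conflicts_py_spec : Claim_equal_effective_profile_states_and_conflicts_py := by
  intro av pm db _hdom hpre
  obtain ⟨hav, hpm, hdblow⟩ := hpre
  -- db keys are distinct (their lowercasings are)
  have hdbfst : (db.map Prod.fst).Nodup := by
    have : ((db.map Prod.fst).map PySem.Str.lower).Nodup := by
      rw [List.map_map]; exact hdblow
    exact List.Nodup.of_map _ this
  unfold Spec_effective_profile_states_and_conflicts_py
  unfold effective_profile_states_and_conflicts_py effective_profile_states_and_conflicts_py_alt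
  simp only []
  set dbd := (PySem.Dict.ofList db : PySem.Dict String Bool) with hdbd
  set pmd := (PySem.Dict.ofList pm : PySem.Dict String Bool) with hpmdd
  have hpmitems : pmd.items = pm := pv_ofList_items pm hpm
  have hdbitems : dbd.items = db := pv_ofList_items db hdbfst
  have hpmkeys : pmd.keys = pm.map Prod.fst := by
    simp only [PySem.Dict.keys, hpmitems]
  set c : String × Bool → Bool := fun p => PySem.Set.contains av p.1 with hc
  set pe : String → Bool := fun k => pmd.getD k false with hpe
  set f : String → String × Bool := fun fp => (fp, pe fp) with hf
  set explicitL := pmd.keys.filter (fun fp => PySem.Set.contains av fp) with hexplicit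
  set implicitL := av.filter (fun fp => !(pmd.contains fp)) with himplicit
  set U := explicitL ++ implicitL with hU
  -- contains pmd ↔ key of pm
  have hmem_pmd : ∀ fp, (pmd.contains fp = true ↔ fp ∈ pm.map Prod.fst) := by
    intro fp; rw [pv_contains_iff, hpmitems]
  have hpmknd : pmd.keys.Nodup := by rw [hpmkeys]; exact hpm
  have hdbknd : dbd.keys.Nodup := by
    simp only [PySem.Dict.keys, hdbitems]; exact hdbfst
  -- getD on pmd returns the stored value
  have hgetd_pm : ∀ p ∈ pm, pe p.1 = p.2 := by
    intro p hp
    have : (p.1, p.2) ∈ pmd.items := by rw [hpmitems]; simpa using hp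
    exact PySem.Dict.getD_of_mem_items pmd this hpmknd false
  -- explicit part equals A's filtered profile entries
  have hexp_map : explicitL.map f = pm.filter c := by
    rw [hexplicit, hpmkeys, List.filter_map, List.map_map]
    have : pm.filter ((fun fp => PySem.Set.contains av fp) ∘ Prod.fst) = pm.filter c := by
      apply List.filter_congr; intro p _; rfl
    rw [this]
    have h2 : (pm.filter c).map (f ∘ Prod.fst) = (pm.filter c).map id := by
      apply List.map_congr_left
      intro p hp
      have hppm : p ∈ pm := List.mem_of_mem_filter hp
      show (p.1, pe p.1) = p
      rw [hgetd_pm p hppm]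
    rw [h2, List.map_id]
  -- implicit part maps to (fp, false)
  have himp_map : implicitL.map f = implicitL.map (fun fp => (fp, false)) := by
    apply List.map_congr_left
    intro fp hfp
    have hnc : pmd.contains fp = false := by
      have := (List.mem_filter.1 (himplicit ▸ hfp)).2
      simpa using this
    show (fp, pe fp) = (fp, false)
    rw [hpe]; simp only []; rw [PySem.Dict.getD_of_not_contains pmd false hnc]
  -- membership in U is membership in av
  have hmemU : ∀ k, k ∈ U ↔ k ∈ av := by
    intro k
    constructor
    · intro hk
      rcases List.mem_append.1 hk with h | h
      · have := (List.mem_filter.1 (hexplicit ▸ h)).2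
        exact (pv_set_contains av k).1 this
      · exact List.mem_of_mem_filter (himplicit ▸ h)
    · intro hk
      by_cases hck : pmd.contains k
      · refine List.mem_append.2 (Or.inl ?_)
        rw [hexplicit, hpmkeys]
        refine List.mem_filter.2 ⟨(hmem_pmd k).1 hck, (pv_set_contains av k).2 hk⟩
      · refine List.mem_append.2 (Or.inr ?_)
        rw [himplicit]
        exact List.mem_filter.2 ⟨hk, by simpa using hck⟩
  -- U has no duplicates
  have hUnd : U.Nodup := by
    rw [hU]
    refine List.Nodup.append ?_ ?_ ?_
    · rw [hexplicit, hpmkeys]; exact hpm.filter _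
    · rw [himplicit]; exact hav.filter _
    · intro k hk1 hk2
      have h1 : pmd.contains k = true := by
        rw [hexplicit, hpmkeys] at hk1
        exact (hmem_pmd k).2 (List.mem_of_mem_filter hk1)
      have h2 : pmd.contains k = false := by
        have := (List.mem_filter.1 (himplicit ▸ hk2)).2
        simpa using this
      rw [h1] at h2; exact absurd h2 (by simp)
  -- B's effective dict, at the items level
  have hBitems : (PySem.Dict.ofList (U.map f) : PySem.Dict String Bool).items = U.map f := by
    apply pv_ofList_items
    have : (U.map f).map Prod.fst = U := by
      rw [List.map_map]; exact List.map_id U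
    rw [this]; exact hUnd
  -- A's effective dict, at the items level
  set d0 := pm.foldl (fun d p => if c p then d.insert p.1 p.2 else d) PySem.Dict.empty with hd0
  have h1 : d0.items = pm.filter c := by
    rw [hd0, pv_foldl_insert_items c pm PySem.Dict.empty hpm (fun p _ => rfl)]
    rfl
  have hmem_d0 : ∀ fp ∈ av, (d0.contains fp = true ↔ fp ∈ pm.map Prod.fst) := by
    intro fp hfp
    rw [pv_contains_iff, h1]
    constructor
    · intro h
      rcases List.mem_map.1 h with ⟨p, hp, rfl⟩
      exact List.mem_map_of_mem (List.mem_of_mem_filter hp)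
    · intro h
      rcases List.mem_map.1 h with ⟨p, hp, rfl⟩
      refine List.mem_map_of_mem (List.mem_filter.2 ⟨hp, ?_⟩)
      exact (pv_set_contains av p.1).2 hfp
  have hcond : ∀ fp ∈ av, (!d0.contains fp) = (!pmd.contains fp) := by
    intro fp hfp
    have h : d0.contains fp = pmd.contains fp :=
      Bool.eq_iff_iff.2 ((hmem_d0 fp hfp).trans (hmem_pmd fp).symm)
    rw [h]
  have hfilter : av.filter (fun fp => !d0.contains fp) = av.filter (fun fp => !pmd.contains fp) :=
    List.filter_congr hcond
  have hE : (av.foldl (fun d fp => if d.contains fp then d else d.insert fp false) d0).items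
      = U.map f := by
    rw [pv_backfillA_items av d0 hav, h1, hfilter, hU, List.map_append, hexp_map, himp_map]
  -- conflicts: A's unsorted list
  set qA : String × Bool → Bool := fun p => (dbd.get? p.1).any (fun s => p.2 != s) with hqA
  set g : String → String × Bool × Bool := fun k => (k, pe k, dbd.getD k false) with hg
  have hLA : (av.foldl (fun d fp => if d.contains fp then d else d.insert fp false) d0).items.foldl
        (pvConflictStepA dbd) []
      = (U.filter (fun k => qA (f k))).map g := by
    rw [hE, pv_foldA dbd, List.nil_append, List.filter_map, List.map_map]
    rfl
  -- conflicts: B's unsorted list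
  have hgetd_db : ∀ p ∈ db, dbd.getD p.1 false = p.2 := by
    intro p hp
    have : (p.1, p.2) ∈ dbd.items := by rw [hdbitems]; simpa using hp
    exact PySem.Dict.getD_of_mem_items dbd this hdbknd false
  set h2c : String → Bool := fun k => PySem.Set.contains av k && (pe k != dbd.getD k false) with hh2c
  have hLB : dbd.items.foldl
        (fun acc p =>
          if PySem.Set.contains av p.1 && (pe p.1 != p.2) then
            acc ++ [(p.1, pe p.1, p.2)] else acc) []
      = ((db.map Prod.fst).filter h2c).map g := by
    rw [hdbitems, PySem.List.foldl_append_if, List.nil_append]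
    have hfc : db.filter (fun p => PySem.Set.contains av p.1 && (pe p.1 != p.2))
        = db.filter (fun p => h2c p.1) := by
      apply List.filter_congr
      intro p hp
      rw [hh2c]; simp only []
      rw [hgetd_db p hp]
    rw [hfc]
    have hmc : (db.filter (fun p => h2c p.1)).map (fun p => (p.1, pe p.1, p.2))
        = (db.filter (fun p => h2c p.1)).map (fun p => g p.1) := by
      apply List.map_congr_left
      intro p hp
      have hpdb : p ∈ db := List.mem_of_mem_filter hp
      rw [hg]; simp only []
      rw [hgetd_db p hpdb]
    rw [hmc, List.filter_map, List.map_map]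
    rfl
  -- the two unsorted conflict lists are permutations of each other
  set F1 := U.filter (fun k => qA (f k)) with hF1
  set F2 := (db.map Prod.fst).filter h2c with hF2
  have hcharF1 : ∀ k, k ∈ F1 ↔ k ∈ av ∧ ∃ s, dbd.get? k = some s ∧ pe k ≠ s := by
    intro k
    rw [hF1, List.mem_filter]
    constructor
    · rintro ⟨hkU, hq⟩
      refine ⟨(hmemU k).1 hkU, ?_⟩
      rw [hqA] at hq; simp only [hf] at hq
      cases hgk : dbd.get? k with
      | none => rw [hgk] at hq; simp [Option.any] at hq
      | some s =>
        rw [hgk] at hq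
        refine ⟨s, rfl, ?_⟩
        simpa [Option.any] using hq
    · rintro ⟨hkav, s, hgk, hne⟩
      refine ⟨(hmemU k).2 hkav, ?_⟩
      rw [hqA]; simp only [hf]
      rw [hgk]; simpa [Option.any] using hne
  have hcharF2 : ∀ k, k ∈ F2 ↔ k ∈ av ∧ ∃ s, dbd.get? k = some s ∧ pe k ≠ s := by
    intro k
    rw [hF2, List.mem_filter]
    constructor
    · rintro ⟨hkdb, hh⟩
      rw [hh2c] at hh; simp only [Bool.and_eq_true] at hh
      have hkc : dbd.contains k = true := by
        rw [pv_contains_iff, hdbitems]; exact hkdb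
      have hks : (dbd.get? k).isSome := by rw [← PySem.Dict.contains_eq_isSome_get?]; exact hkc
      rcases Option.isSome_iff_exists.mp hks with ⟨s, hgk⟩
      refine ⟨(pv_set_contains av k).1 hh.1, s, hgk, ?_⟩
      have : dbd.getD k false = s := by rw [PySem.Dict.getD_eq_get?_getD, hgk]; rfl
      rw [this] at hh
      simpa using hh.2
    · rintro ⟨hkav, s, hgk, hne⟩
      have hgd : dbd.getD k false = s := by rw [PySem.Dict.getD_eq_get?_getD, hgk]; rfl
      have hkdb : k ∈ db.map Prod.fst := by
        have : (k, s) ∈ dbd.items := PySem.Dict.mem_items_of_get?_eq_some dbd hgk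
        rw [hdbitems] at this
        exact List.mem_map.2 ⟨(k, s), this, rfl⟩
      refine ⟨hkdb, ?_⟩
      rw [hh2c]; simp only [Bool.and_eq_true]
      exact ⟨(pv_set_contains av k).2 hkav, by rw [hgd]; simpa using hne⟩
  have hF1nd : F1.Nodup := hUnd.filter _
  have hF2nd : F2.Nodup := hdbfst.filter _
  have hFperm : F1.Perm F2 := by
    rw [List.perm_ext_iff_of_nodup hF1nd hF2nd]
    intro k
    rw [hcharF1 k, hcharF2 k]
  have hLALB : ((U.filter (fun k => qA (f k))).map g).Perm (((db.map Prod.fst).filter h2c).map g) :=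
    hFperm.map g
  -- sorted results coincide: the sort keys of the conflicts are pairwise distinct
  set key : String × Bool × Bool → String := fun item => PySem.Str.lower item.1 with hkey
  set LA := (U.filter (fun k => qA (f k))).map g with hLAdef
  set LB := ((db.map Prod.fst).filter h2c).map g with hLBdef
  set ys := PySem.List.sorted LA key false with hys
  have hyperm : ys.Perm LA := PySem.List.sorted_perm _ _ _
  have hinj : ∀ x ∈ F1, ∀ y ∈ F1, PySem.Str.lower x = PySem.Str.lower y → x = y := by
    have hdbinj := List.inj_on_of_nodup_map (f := PySem.Str.lower)
      (l := db.map Prod.fst) (by rw [List.map_map]; exact hdblow)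
    intro x hx y hy hxy
    have hxF2 : x ∈ F2 := (hcharF2 x).2 ((hcharF1 x).1 hx)
    have hyF2 : y ∈ F2 := (hcharF2 y).2 ((hcharF1 y).1 hy)
    rw [hF2] at hxF2 hyF2
    exact hdbinj (List.mem_filter.1 hxF2).1 (List.mem_filter.1 hyF2).1 hxy
  have hLAkeys : (LA.map key).Nodup := by
    rw [hLAdef, List.map_map]
    have : key ∘ g = PySem.Str.lower := rfl
    rw [this]
    exact hF1nd.map_on hinj
  have hyskeys : (ys.map key).Nodup := ((hyperm.map key).nodup_iff).2 hLAkeys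
  have hysle : ys.Pairwise (fun a b => key a ≤ key b) := PySem.List.sorted_pairwise _ _
  have hysne : ys.Pairwise (fun a b => key a ≠ key b) := by
    have := hyskeys
    rw [List.nodup_iff_pairwise_ne, List.pairwise_map] at this
    exact this
  have hyslt : ys.Pairwise (fun a b => key a < key b) :=
    (hysle.and hysne).imp (fun h => lt_of_le_of_ne h.1 h.2)
  have hsorted : PySem.List.sorted LB key false = ys :=
    PySem.List.sorted_eq_of_perm_of_pairwise_lt LB ys key (hyperm.trans hLALB) hyslt
  refine Prod.ext ?_ ?_
  · simpa using hE.trans hBitems.symm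
  · show PySem.List.sorted _ key false = PySem.List.sorted _ key false
    rw [hLA, hLB, hsorted, hys]
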